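-- pv_equiv track=rewrite | github.com/OCHA-DAP/hapi-tabletop | scripts/get_indicator.py | _add_fixed_values
-- ===== SOURCE A (Python) =====
-- def _add_fixed_values(fixedCols, data):
--     for fixedCol in fixedCols:
--         for idx, row in enumerate(data):
--             if idx == 0:
--                 data[idx].append(fixedCol["key"])
--             else:
--                 data[idx].append(fixedCol["value"])
--
--     return data
-- ===== SOURCE B (Python) =====
-- def _add_fixed_values(fixedCols, data):
--     vals = [c["value"] for c in fixedCols]
--     out = [row + vals for row in data]
--     if out:
--         out[0] = data[0] + [c["key"] for c in fixedCols]
--     return out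
-- ===== Notes on version B (the rewrite author's own statement) =====
-- stated objective: alternative
-- what changed: Instead of a column-outer double loop of per-cell appends with an index test, B builds a fresh result by one uniform map appending the value suffix to every row and then patches row 0 with the key suffix; B does not mutate data.
-- outside the precondition, e.g. on _add_fixed_values([{'key': 'k'}], [['a']]): A returns [['a', 'k']], B raises KeyError; on _add_fixed_values([{}], []): A returns [], B raises KeyError
import Mathlib
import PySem

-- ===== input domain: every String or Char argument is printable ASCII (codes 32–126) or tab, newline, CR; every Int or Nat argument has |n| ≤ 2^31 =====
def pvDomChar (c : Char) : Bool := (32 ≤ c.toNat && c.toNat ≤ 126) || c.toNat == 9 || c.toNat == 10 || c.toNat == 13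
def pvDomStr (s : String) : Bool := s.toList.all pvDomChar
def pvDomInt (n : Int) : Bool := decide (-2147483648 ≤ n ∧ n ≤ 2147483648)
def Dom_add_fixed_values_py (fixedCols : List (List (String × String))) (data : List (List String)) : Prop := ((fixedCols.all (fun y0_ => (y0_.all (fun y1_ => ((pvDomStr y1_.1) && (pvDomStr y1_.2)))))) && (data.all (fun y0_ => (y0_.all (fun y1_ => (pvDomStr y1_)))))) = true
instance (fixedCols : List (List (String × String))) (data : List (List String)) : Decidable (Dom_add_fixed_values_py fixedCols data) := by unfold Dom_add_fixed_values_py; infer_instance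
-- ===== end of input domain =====

-- B builds a fresh result: one uniform map appends the value suffix to every row, then
-- row 0 is patched with the key suffix (objective: alternative). A mutates `data`'s rows
-- in place; B does not — the equivalence proved here is about the returned value only.

-- first-match lookup of a key in a Python dict rendered as an association list;
-- exact for Python dicts (unique keys). `.getD ""` is only reached where Python raises
-- KeyError, which Pre_add_fixed_values_py excludes.
def pyLookup (d : List (String × String)) (k : String) : Option String :=
  (d.find? (fun p => p.1 == k)).map (·.2)

-- ===== PORT A =====
def add_fixed_values_py (fixedCols : List (List (String × String))) (data : List (List String)) : List (List String) :=
  fixedCols.foldl (fun d col =>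
    (PySem.List.enumerate d 0).map (fun p =>
      if p.1 == 0 then p.2 ++ [(pyLookup col "key").getD ""]
      else p.2 ++ [(pyLookup col "value").getD ""])) data

-- ===== PORT B =====
def add_fixed_values_py_alt (fixedCols : List (List (String × String))) (data : List (List String)) : List (List String) :=
  let vals := fixedCols.map (fun c => (pyLookup c "value").getD "")
  let out := data.map (· ++ vals)
  -- `if out: out[0] = data[0] + [c["key"] for c in fixedCols]`
  match out with
  | [] => []
  | _ :: t => (data.headD [] ++ fixedCols.map (fun c => (pyLookup c "key").getD "")) :: t

-- ===== PRECONDITION & SPEC =====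
-- Pre_ excludes inputs where some fixedCol lacks a "key" or "value" entry: A raises
-- KeyError there except in the degenerate empty/single-row cases where the missing entry
-- is never read, while B always reads both entries and raises KeyError.
def Pre_add_fixed_values_py (fixedCols : List (List (String × String))) (data : List (List String)) : Prop :=
  ∀ col ∈ fixedCols, (pyLookup col "key").isSome ∧ (pyLookup col "value").isSome
instance (fixedCols : List (List (String × String))) (data : List (List String)) : Decidable (Pre_add_fixed_values_py fixedCols data) := by unfold Pre_add_fixed_values_py; infer_instance

def pvWitness_add_fixed_values_py : (List (List (String × String))) × List (List String) :=
  ([[("key", "K1"), ("value", "V1")], [("key", "K2"), ("value", "V2")]], [["a", "b"], ["c"]])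

def Spec_add_fixed_values_py (fixedCols : List (List (String × String))) (data : List (List String)) (out : List (List String)) : Prop := out = add_fixed_values_py_alt fixedCols data
instance (fixedCols : List (List (String × String))) (data : List (List String)) (out : List (List String)) : Decidable (Spec_add_fixed_values_py fixedCols data out) := by unfold Spec_add_fixed_values_py; infer_instance

-- ===== CLAIM (what is proved, stated in full; the proofs are below) =====
def Claim_equal_add_fixed_values_py : Prop := ∀ (fixedCols : List (List (String × String))) (data : List (List String)), Dom_add_fixed_values_py fixedCols data → Pre_add_fixed_values_py fixedCols data → Spec_add_fixed_values_py fixedCols data (add_fixed_values_py fixedCols data)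

-- ===== LEMMAS AND PROOFS =====

-- head/tail normal form of "append ks to row 0, vs to every later row"
def stamp (ks vs : List String) : List (List String) → List (List String)
  | [] => []
  | r :: rs => (r ++ ks) :: rs.map (· ++ vs)

theorem enumerate_map_tail (ks vs : List String)
    (rs : List (List String)) : ∀ s : Int, 1 ≤ s →
    (PySem.List.enumerate rs s).map
      (fun p => if p.1 == 0 then p.2 ++ ks else p.2 ++ vs) = rs.map (· ++ vs) := by
  induction rs with
  | nil => intro s _; simp [PySem.List.enumerate_nil]
  | cons r rs ih =>
      intro s hs
      have h0 : ¬ s = 0 := by omega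
      simp only [PySem.List.enumerate_cons, List.map_cons]
      rw [ih (s + 1) (by omega)]
      simp [h0]

theorem stamp_eq (ks vs : List String) (data : List (List String)) :
    (PySem.List.enumerate data 0).map
      (fun p => if p.1 == 0 then p.2 ++ ks else p.2 ++ vs) = stamp ks vs data := by
  cases data with
  | nil => simp [stamp, PySem.List.enumerate_nil]
  | cons r rs =>
      simp only [PySem.List.enumerate_cons, List.map_cons, stamp]
      rw [enumerate_map_tail ks vs rs (0 + 1) (by omega)]
      simp

theorem stamp_stamp (k v : String) (ks vs : List String) (d : List (List String)) :
    stamp ks vs (stamp [k] [v] d) = stamp (k :: ks) (v :: vs) d := by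
  cases d with
  | nil => rfl
  | cons r rs => simp [stamp, List.map_map, Function.comp_def, List.append_assoc]

theorem portA_eq_stamp (fixedCols : List (List (String × String))) (data : List (List String)) :
    add_fixed_values_py fixedCols data =
      stamp (fixedCols.map (fun c => (pyLookup c "key").getD ""))
            (fixedCols.map (fun c => (pyLookup c "value").getD "")) data := by
  induction fixedCols generalizing data with
  | nil => cases data <;> simp [add_fixed_values_py, stamp]
  | cons c cs ih =>
      simp only [add_fixed_values_py, List.foldl_cons, List.map_cons]
      rw [stamp_eq]
      have := ih (stamp [(pyLookup c "key").getD ""] [(pyLookup c "value").getD ""] data)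
      simp only [add_fixed_values_py] at this
      rw [this, stamp_stamp]

theorem portB_eq_stamp (fixedCols : List (List (String × String))) (data : List (List String)) :
    add_fixed_values_py_alt fixedCols data =
      stamp (fixedCols.map (fun c => (pyLookup c "key").getD ""))
            (fixedCols.map (fun c => (pyLookup c "value").getD "")) data := by
  cases data with
  | nil => rfl
  | cons r rs => simp [add_fixed_values_py_alt, stamp]

-- ===== VERDICT (by name: the statement is the Claim_ definition above) =====
theorem add_fixed_values_py_spec : Claim_equal_add_fixed_values_py := by
  intro fixedCols data _ _
  unfold Spec_add_fixed_values_py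
  rw [portA_eq_stamp, portB_eq_stamp]
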